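-- pv_equiv track=rewrite | github.com/bghani/insectecho-v1 | util.py | extract_species_recording_ids
-- ===== SOURCE A (Python) =====
-- def extract_species_recording_ids(file_paths):
--     species_to_ids = {}
--     for path in file_paths:
--         parts = path.split('/')
--         species_name = parts[-2]
--         recording_id = parts[-1].split('_')[0]
--         if species_name in species_to_ids:
--             species_to_ids[species_name].append(recording_id)
--         else:
--             species_to_ids[species_name] = [recording_id]
--
--     return species_to_ids
-- ===== SOURCE B (Python) =====
-- def extract_species_recording_ids(file_paths):
--     # pipeline: flat pair list -> first-occurrence key order -> per-key gather
--     pairs = [(parts[-2], parts[-1].split('_')[0])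
--              for parts in (path.split('/') for path in file_paths)]
--     order = list(dict.fromkeys(sp for sp, _ in pairs))
--     return {sp: [rid for s, rid in pairs if s == sp] for sp in order}
-- ===== Notes on version B (the rewrite author's own statement) =====
-- stated objective: alternative
-- what changed: B replaces A's single-pass dict accumulation (append to the entry or create it) by a three-stage pipeline: build a flat (species, id) pair list, deduplicate the species keys in first-occurrence order with dict.fromkeys, then assemble each group by a per-key scan of the pair list; it trades A's O(n) pass for an O(n*k) gather.
import Mathlib
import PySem

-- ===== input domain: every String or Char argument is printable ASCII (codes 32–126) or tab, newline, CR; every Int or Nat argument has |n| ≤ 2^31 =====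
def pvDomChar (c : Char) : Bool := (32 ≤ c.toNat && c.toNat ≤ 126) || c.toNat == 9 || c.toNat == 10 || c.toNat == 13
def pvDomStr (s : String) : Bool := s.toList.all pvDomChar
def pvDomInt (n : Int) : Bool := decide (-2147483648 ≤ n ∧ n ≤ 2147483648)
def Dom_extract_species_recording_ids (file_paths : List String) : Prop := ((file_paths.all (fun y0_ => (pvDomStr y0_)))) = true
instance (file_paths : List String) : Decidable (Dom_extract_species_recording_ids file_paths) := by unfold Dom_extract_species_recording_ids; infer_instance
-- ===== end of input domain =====

-- B regroups A's dict-accumulation loop as a pair-list / key-dedup / per-key-gather pipeline (alternative decomposition);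
-- equivalence is claimed on paths containing '/', i.e. where Python A returns (it raises IndexError otherwise).

-- ===== PORT A =====
-- path.split('/'): exact, '/' ≠ '' so split? is always some (the getD default is never used)
def pvParts (path : String) : List String := (PySem.Str.split? path "/").getD [path]
-- parts[-2]: IndexError (pyGet? = none) when the path has no '/'; those inputs are excluded by Pre_
def pvSpecies (path : String) : String := (PySem.List.pyGet? (pvParts path) (-2)).getD ""
-- parts[-1].split('_')[0]: parts and the '_'-split are nonempty lists, so the defaults are never used
def pvRecId (path : String) : String :=
  ((PySem.Str.split? ((PySem.List.pyGet? (pvParts path) (-1)).getD "") "_").getD []).head?.getD ""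

def extract_species_recording_ids (file_paths : List String) : List (String × List String) :=
  (file_paths.foldl (fun d path =>
      let sp := pvSpecies path
      let rid := pvRecId path
      if d.contains sp then d.modify sp [] (fun l => l ++ [rid])
      else d.insert sp [rid])
    PySem.Dict.empty).items

-- ===== PORT B =====
def extract_species_recording_ids_alt (file_paths : List String) : List (String × List String) :=
  let pairs := file_paths.map (fun path => (pvSpecies path, pvRecId path))
  let order := PySem.List.dedup (pairs.map Prod.fst)
  order.map (fun sp => (sp, (pairs.filter (fun q => q.1 == sp)).map Prod.snd))

-- ===== PRECONDITION & SPEC =====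
-- Pre_ excludes exactly the paths with no '/' : there parts[-2] raises IndexError in both Pythons.
def Pre_extract_species_recording_ids (file_paths : List String) : Prop :=
  ∀ p ∈ file_paths, 2 ≤ ((PySem.Str.split? p "/").getD [p]).length
instance (file_paths : List String) : Decidable (Pre_extract_species_recording_ids file_paths) := by unfold Pre_extract_species_recording_ids; infer_instance
def pvWitness_extract_species_recording_ids : List String := ["Parus_major/12_rec.wav", "Parus_major/7_rec.wav", "Sitta/3.wav"]

def Spec_extract_species_recording_ids (file_paths : List String) (out : List (String × List String)) : Prop := out = extract_species_recording_ids_alt file_paths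
instance (file_paths : List String) (out : List (String × List String)) : Decidable (Spec_extract_species_recording_ids file_paths out) := by unfold Spec_extract_species_recording_ids; infer_instance

-- ===== CLAIM (what is proved, stated in full; the proofs are below) =====
def Claim_equal_extract_species_recording_ids : Prop := ∀ (file_paths : List String), Dom_extract_species_recording_ids file_paths → Pre_extract_species_recording_ids file_paths → Spec_extract_species_recording_ids file_paths (extract_species_recording_ids file_paths)

-- ===== LEMMAS AND PROOFS =====

-- A's loop body (append to existing entry / create it) is exactly one Dict.modify
lemma pv_step_eq_modify (d : PySem.Dict String (List String)) (sp rid : String) :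
    (if d.contains sp then d.modify sp [] (fun l => l ++ [rid]) else d.insert sp [rid])
      = d.modify sp [] (fun l => l ++ [rid]) := by
  by_cases h : d.contains sp = true
  · simp [h]
  · simp only [Bool.not_eq_true] at h
    simp [h, PySem.Dict.modify, PySem.Dict.getD_of_not_contains _ _ h]

-- ===== VERDICT (by name: the statement is the Claim_ definition above) =====

theorem extract_species_recording_ids_spec : Claim_equal_extract_species_recording_ids := by
  intro fps _ _
  unfold Spec_extract_species_recording_ids extract_species_recording_ids extract_species_recording_ids_alt
  -- normalise A's fold to an unconditional modify over the mapped pair list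
  have hstep : fps.foldl (fun d path =>
        let sp := pvSpecies path
        let rid := pvRecId path
        if d.contains sp then d.modify sp [] (fun l => l ++ [rid]) else d.insert sp [rid])
      PySem.Dict.empty
      = (fps.map (fun path => (pvSpecies path, pvRecId path))).foldl
          (fun d q => d.modify q.1 [] (fun l => l ++ [q.2])) PySem.Dict.empty := by
    rw [List.foldl_map]
    exact PySem.List.foldl_congr_mem _ _ _ _ (fun d x _ => pv_step_eq_modify d (pvSpecies x) (pvRecId x))
  rw [hstep]
  set ps := fps.map (fun path => (pvSpecies path, pvRecId path)) with hps
  have hkeys : (ps.foldl (fun d q => d.modify q.1 [] (fun l => l ++ [q.2])) PySem.Dict.empty).keys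
      = PySem.List.dedup (ps.map Prod.fst) := by
    have := PySem.Dict.keys_foldl_modify_key (l := ps) (key := Prod.fst) (d0 := ([] : List String))
      (f := fun _ q => fun l => l ++ [q.2]) (d := PySem.Dict.empty)
    simpa [PySem.Dict.keys_empty, PySem.Set.update_nil_left, PySem.List.dedup] using this
  have hnd : (ps.foldl (fun d q => d.modify q.1 [] (fun l => l ++ [q.2])) PySem.Dict.empty).keys.Nodup := by
    exact PySem.Dict.nodup_keys_foldl_modify_key ps Prod.fst [] (fun _ q => fun l => l ++ [q.2])
      PySem.Dict.empty (by simp [PySem.Dict.keys_empty])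
  rw [PySem.Dict.items_eq_map_keys _ hnd ([] : List String), hkeys]
  refine List.map_congr_left (fun sp _ => ?_)
  have hg := PySem.Dict.getD_foldl_modify_append (l := ps) (d := PySem.Dict.empty) (c := sp)
  simp only [PySem.Dict.getD_empty, List.nil_append] at hg
  simp [hg]
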